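-- pv_equiv track=rewrite | github.com/mhmdho/2D-plan-to-3D | roof_utilities.py | group_neighbors
-- ===== SOURCE A (Python) =====
-- def group_neighbors(points, gap_threshold=1):
--     groups = []
--     current_group = [points[0]]
--
--     for i in range(1, len(points)):
--         if points[i] - points[i-1] <= gap_threshold:
--             current_group.append(points[i])
--         else:
--             groups.append(current_group)
--             current_group = [points[i]]
--
--     groups.append(current_group)  # Add the last group
--     return groups
-- ===== SOURCE B (Python) =====
-- def group_neighbors(points, gap_threshold=1):
--     n = len(points)
--     breaks = [0] + [i for i in range(1, n) if points[i] - points[i-1] > gap_threshold] + [n]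
--     return [points[breaks[j]:breaks[j+1]] for j in range(len(breaks) - 1)]
-- ===== Notes on version B (the rewrite author's own statement) =====
-- stated objective: alternative
-- what changed: Replaces A's accumulate-and-flush loop (mutable current_group/groups) with a boundaries-then-slice decomposition: one pass collects the break indices, then the result is built by slicing between consecutive boundaries.
-- outside the precondition, e.g. on group_neighbors([], 1): A raises IndexError, B returns [[]]
import Mathlib
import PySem

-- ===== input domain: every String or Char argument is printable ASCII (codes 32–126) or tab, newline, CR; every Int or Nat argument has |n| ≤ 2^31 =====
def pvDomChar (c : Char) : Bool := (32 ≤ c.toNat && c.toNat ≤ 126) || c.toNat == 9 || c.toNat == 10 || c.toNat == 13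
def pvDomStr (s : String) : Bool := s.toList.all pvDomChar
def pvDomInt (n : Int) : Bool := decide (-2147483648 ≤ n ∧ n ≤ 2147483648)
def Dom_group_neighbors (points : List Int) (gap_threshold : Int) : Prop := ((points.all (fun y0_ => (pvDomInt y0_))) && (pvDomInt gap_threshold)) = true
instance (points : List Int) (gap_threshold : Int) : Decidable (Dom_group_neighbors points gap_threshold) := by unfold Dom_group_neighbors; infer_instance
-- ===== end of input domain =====

-- B replaces A's accumulate-and-flush loop by a collect-break-indices-then-slice decomposition (alternative, same cost).


-- ===== PORT A =====
-- literal port of A; on [] Python's points[0] raises IndexError (excluded by Pre_), so the [] branch is a placeholder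
def group_neighbors (points : List Int) (gap_threshold : Int) : List (List Int) :=
  match points with
  | [] => []
  | p0 :: _ =>
    let st := (PySem.List.pyRange 1 (points.length : Int)).foldl
      (fun (st : List (List Int) × List Int) i =>
        if PySem.List.pyGetD points i 0 - PySem.List.pyGetD points (i-1) 0 ≤ gap_threshold then
          (st.1, st.2 ++ [PySem.List.pyGetD points i 0])
        else
          (st.1 ++ [st.2], [PySem.List.pyGetD points i 0]))
      ([], [p0])
    st.1 ++ [st.2]

-- ===== PORT B =====
def group_neighbors_alt (points : List Int) (gap_threshold : Int) : List (List Int) :=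
  let n : Int := points.length
  let breaks : List Int :=
    [0] ++ (PySem.List.pyRange 1 n).filter
            (fun i => decide (gap_threshold < PySem.List.pyGetD points i 0 - PySem.List.pyGetD points (i-1) 0)) ++ [n]
  (PySem.List.pyRange 0 ((breaks.length : Int) - 1)).map
    (fun j => PySem.List.slice points (some (PySem.List.pyGetD breaks j 0)) (some (PySem.List.pyGetD breaks (j+1) 0)))

-- ===== PRECONDITION & SPEC =====
-- A evaluates points[0] before its loop, so it raises IndexError on the empty list; Pre_ excludes exactly that input.
def Pre_group_neighbors (points : List Int) (gap_threshold : Int) : Prop := points ≠ []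
instance (points : List Int) (gap_threshold : Int) : Decidable (Pre_group_neighbors points gap_threshold) := by unfold Pre_group_neighbors; infer_instance
def pvWitness_group_neighbors : List Int × Int := ([1, 2, 5, 6, 9], 1)

def Spec_group_neighbors (points : List Int) (gap_threshold : Int) (out : List (List Int)) : Prop := out = group_neighbors_alt points gap_threshold
instance (points : List Int) (gap_threshold : Int) (out : List (List Int)) : Decidable (Spec_group_neighbors points gap_threshold out) := by unfold Spec_group_neighbors; infer_instance

-- ===== CLAIM (what is proved, stated in full; the proofs are below) =====
def Claim_equal_group_neighbors : Prop := ∀ (points : List Int) (gap_threshold : Int), Dom_group_neighbors points gap_threshold → Pre_group_neighbors points gap_threshold → Spec_group_neighbors points gap_threshold (group_neighbors points gap_threshold)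

-- ===== LEMMAS AND PROOFS =====

-- common recursive reference: (first group, remaining groups) of the grouping of x :: ys
def grec1 (gap x : Int) : List Int → List Int × List (List Int)
  | [] => ([x], [])
  | y :: t => let r := grec1 gap y t
              if y - x ≤ gap then (x :: r.1, r.2) else ([x], r.1 :: r.2)

-- A's loop step, on an adjacent pair (prev, cur)
def gstep (gap : Int) (st : List (List Int) × List Int) (ab : Int × Int) : List (List Int) × List Int :=
  if ab.2 - ab.1 ≤ gap then (st.1, st.2 ++ [ab.2]) else (st.1 ++ [st.2], [ab.2])

-- B's slicing of xs between consecutive boundaries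
def chop (xs : List Int) (bs : List Int) : List (List Int) :=
  (bs.zip bs.tail).map (fun p => PySem.List.slice xs (some p.1) (some p.2))

-- B's list of break indices
def Fb (gap : Int) (xs : List Int) : List Int :=
  (PySem.List.pyRange 1 (xs.length : Int)).filter
    (fun i => decide (gap < PySem.List.pyGetD xs i 0 - PySem.List.pyGetD xs (i-1) 0))

lemma pyRange_one_eq (a b : Int) :
    PySem.List.pyRange a b = (List.range (b - a).toNat).map (fun (k : Nat) => a + (k : Int)) := by
  unfold PySem.List.pyRange
  norm_num
  split_ifs with h
  · simp
  · have : (b - a).toNat = 0 := by omega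
    simp [this]

lemma pyRange_one_shift (a b : Int) :
    PySem.List.pyRange (a+1) (b+1) = (PySem.List.pyRange a b).map (· + 1) := by
  rw [pyRange_one_eq, pyRange_one_eq]
  have : b + 1 - (a + 1) = b - a := by ring
  rw [this, List.map_map]
  apply List.map_congr_left
  intro k _
  simp; ring

lemma pyRange_one_shift1 (b : Int) :
    PySem.List.pyRange 1 (b+1) = (PySem.List.pyRange 0 b).map (· + 1) := by
  have h := pyRange_one_shift 0 b
  norm_num at h
  exact h

lemma pyGetD_cons_succ (x : Int) (ys : List Int) (i : Int) (h : 0 ≤ i) (d : Int) :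
    PySem.List.pyGetD (x :: ys) (i+1) d = PySem.List.pyGetD ys i d := by
  rw [PySem.List.pyGetD_of_nonneg _ _ (by omega), PySem.List.pyGetD_of_nonneg _ _ h]
  have : (i + 1).toNat = i.toNat + 1 := by omega
  rw [this]
  simp

lemma slice_cons_succ (x : Int) (ys : List Int) (b b' : Int) (hb : 0 ≤ b) (hb' : 0 ≤ b') :
    PySem.List.slice (x :: ys) (some (b+1)) (some (b'+1)) = PySem.List.slice ys (some b) (some b') := by
  rw [PySem.List.slice_toNat _ (by omega) (by omega), PySem.List.slice_toNat _ hb hb']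
  have h1 : (b + 1).toNat = b.toNat + 1 := by omega
  have h2 : (b' + 1).toNat = b'.toNat + 1 := by omega
  rw [h1, h2]
  simp

lemma slice_cons_zero (x : Int) (ys : List Int) (m : Int) (hm : 0 ≤ m) :
    PySem.List.slice (x :: ys) (some 0) (some (m+1)) = x :: PySem.List.slice ys (some 0) (some m) := by
  rw [PySem.List.slice_toNat _ (by omega) (by omega), PySem.List.slice_toNat _ le_rfl hm]
  have h2 : (m + 1).toNat = m.toNat + 1 := by omega
  simp [h2]

lemma slice_zero_zero (ys : List Int) : PySem.List.slice ys (some 0) (some 0) = [] := by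
  rw [PySem.List.slice_toNat _ le_rfl le_rfl]; simp

lemma slice_zero_one (x : Int) (ys : List Int) :
    PySem.List.slice (x :: ys) (some 0) (some 1) = [x] := by
  have h := slice_cons_zero x ys 0 le_rfl
  rw [show ((0:Int) + 1) = 1 from by norm_num, slice_zero_zero] at h
  exact h

lemma range_pairs {β : Type} (xs : List Int) (f : Int → Int → β) :
    (List.range (xs.length - 1)).map
      (fun (k : Nat) => f (PySem.List.pyGetD xs (k : Int) 0) (PySem.List.pyGetD xs ((k : Int) + 1) 0)) =
    (xs.zip xs.tail).map (fun p => f p.1 p.2) := by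
  apply List.ext_getElem
  · simp [List.length_zip]
  · intro k h1 h2
    simp only [List.getElem_map, List.getElem_range, List.getElem_zip]
    have hk : k < xs.length - 1 := by simpa using h1
    have e1 : PySem.List.pyGetD xs (k : Int) 0 = xs[k]'(by omega) := by
      rw [PySem.List.pyGetD_natCast]
      exact List.getD_eq_getElem _ _ _
    have ec : ((k : Int) + 1) = ((k + 1 : Nat) : Int) := by push_cast; ring
    have e2 : PySem.List.pyGetD xs ((k : Int) + 1) 0 = xs[k+1]'(by omega) := by
      rw [ec, PySem.List.pyGetD_natCast]
      exact List.getD_eq_getElem _ _ _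
    rw [e1, e2]
    congr 1
    rw [List.getElem_tail]

lemma chop_cons (xs : List Int) (b b' : Int) (bs : List Int) :
    chop xs (b :: b' :: bs) = PySem.List.slice xs (some b) (some b') :: chop xs (b' :: bs) := rfl

lemma chop_shift (x : Int) (ys : List Int) (bs : List Int) (h : ∀ b ∈ bs, 0 ≤ b) :
    chop (x :: ys) (bs.map (· + 1)) = chop ys bs := by
  cases bs with
  | nil => rfl
  | cons b bs' =>
    unfold chop
    simp only [List.map_cons, List.tail_cons]
    rw [show ((b+1) :: bs'.map (· + 1)) = ((b :: bs').map (· + 1)) from rfl, List.zip_map, List.map_map]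
    apply List.map_congr_left
    intro p hp
    obtain ⟨h1, h2⟩ := List.of_mem_zip hp
    exact slice_cons_succ x ys p.1 p.2 (h _ h1) (h _ (List.mem_of_mem_tail h2))

lemma A_main (gap : Int) (ys : List Int) (x : Int) (gs : List (List Int)) (cur : List Int) :
    (((x :: ys).zip ys).foldl (gstep gap) (gs, cur ++ [x])).1 ++
      [(((x :: ys).zip ys).foldl (gstep gap) (gs, cur ++ [x])).2] =
    gs ++ (cur ++ (grec1 gap x ys).1) :: (grec1 gap x ys).2 := by
  induction ys generalizing x gs cur with
  | nil => simp [grec1]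
  | cons y t ih =>
    rw [List.zip_cons_cons, List.foldl_cons]
    simp only [grec1, gstep]
    by_cases hc : y - x ≤ gap
    · simp only [if_pos hc]
      have := ih y gs (cur ++ [x])
      simpa [List.append_assoc] using this
    · simp only [if_neg hc]
      have := ih y (gs ++ [cur ++ [x]]) []
      simpa [List.append_assoc] using this

lemma Fb_nonneg (gap : Int) (xs : List Int) : ∀ i ∈ Fb gap xs, 1 ≤ i := by
  intro i hi
  have := List.mem_of_mem_filter hi
  exact (PySem.List.mem_pyRange_one.mp this).1

lemma Fb_cons (gap x y : Int) (t : List Int) :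
    Fb gap (x :: y :: t) =
      (if gap < y - x then [1] else []) ++ (Fb gap (y :: t)).map (· + 1) := by
  unfold Fb
  have hl : ((x :: y :: t).length : Int) = ((y :: t).length : Int) + 1 := by
    push_cast [List.length_cons]; ring
  rw [hl, pyRange_one_shift1]
  rw [PySem.List.pyRange_one_cons (show (0:Int) < ((y :: t).length : Int) by
    exact_mod_cast Nat.cast_pos.mpr (by simp))]
  rw [List.map_cons, List.filter_cons]
  have hhead : (decide (gap < PySem.List.pyGetD (x :: y :: t) (0+1) 0 - PySem.List.pyGetD (x :: y :: t) (0+1-1) 0)) = decide (gap < y - x) := by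
    norm_num [PySem.List.pyGetD_ofNat']
  rw [hhead]
  rw [show ((0:Int)+1) = 1 from by norm_num]
  rw [List.filter_map]
  have hrest : List.filter ((fun i => decide (gap < PySem.List.pyGetD (x :: y :: t) i 0 - PySem.List.pyGetD (x :: y :: t) (i-1) 0)) ∘ (· + 1)) (PySem.List.pyRange 1 ((y :: t).length : Int)) = List.filter (fun i => decide (gap < PySem.List.pyGetD (y :: t) i 0 - PySem.List.pyGetD (y :: t) (i-1) 0)) (PySem.List.pyRange 1 ((y :: t).length : Int)) := by
    apply List.filter_congr
    intro i hi
    have h1 : 1 ≤ i := (PySem.List.mem_pyRange_one.mp hi).1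
    simp only [Function.comp]
    have e1 : PySem.List.pyGetD (x :: y :: t) (i + 1) 0 = PySem.List.pyGetD (y :: t) i 0 :=
      pyGetD_cons_succ _ _ _ (by omega) _
    have e2 : PySem.List.pyGetD (x :: y :: t) (i + 1 - 1) 0 = PySem.List.pyGetD (y :: t) (i - 1) 0 := by
      rw [show i + 1 - 1 = (i - 1) + 1 by ring]
      exact pyGetD_cons_succ _ _ _ (by omega) _
    rw [e1, e2]
  rw [hrest]
  by_cases hc : gap < y - x <;> simp [hc]

lemma map_pyRange_pairs (bs : List Int) {β : Type} (f : Int → Int → β) :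
    (PySem.List.pyRange 0 ((bs.length : Int) - 1)).map
      (fun j => f (PySem.List.pyGetD bs j 0) (PySem.List.pyGetD bs (j+1) 0)) =
    (bs.zip bs.tail).map (fun p => f p.1 p.2) := by
  rw [pyRange_one_eq]
  have h0 : ((bs.length : Int) - 1 - 0).toNat = bs.length - 1 := by omega
  rw [h0, List.map_map, ← range_pairs bs f]
  apply List.map_congr_left
  intro k _
  simp [Function.comp]

lemma B_unfold (gap : Int) (xs : List Int) :
    group_neighbors_alt xs gap = chop xs (0 :: (Fb gap xs ++ [(xs.length : Int)])) := by
  simp only [group_neighbors_alt]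
  exact map_pyRange_pairs
    ([0] ++ (PySem.List.pyRange 1 ((xs.length : Int))).filter
      (fun i => decide (gap < PySem.List.pyGetD xs i 0 - PySem.List.pyGetD xs (i-1) 0)) ++ [(xs.length : Int)])
    (fun a b => PySem.List.slice xs (some a) (some b))

lemma B_main (gap : Int) (ys : List Int) (x : Int) :
    group_neighbors_alt (x :: ys) gap = (grec1 gap x ys).1 :: (grec1 gap x ys).2 := by
  induction ys generalizing x with
  | nil =>
    rw [B_unfold]
    have hF : Fb gap [x] = [] := by
      unfold Fb
      have : PySem.List.pyRange 1 ((([x] : List Int).length : Int)) = [] := by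
        rw [pyRange_one_eq]; norm_num
      rw [this]; rfl
    rw [hF]
    simp only [List.nil_append, grec1]
    rw [show ((0:Int) :: [((([x]:List Int).length : Int))]) = [0, 1] by norm_num]
    rw [show chop [x] [0, 1] = [PySem.List.slice [x] (some 0) (some 1)] from rfl]
    rw [slice_zero_one x []]
  | cons y t ih =>
    rw [B_unfold, Fb_cons]
    have hM : ∀ b ∈ Fb gap (y :: t) ++ [(((y :: t).length : Int))], (0:Int) ≤ b := by
      intro b hb
      rcases List.mem_append.mp hb with h | h
      · exact le_trans (by norm_num) (Fb_nonneg _ _ _ h)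
      · simp at h; subst h; positivity
    have hlen : (((x :: y :: t).length : Int)) = ((y :: t).length : Int) + 1 := by
      push_cast [List.length_cons]; ring
    have hmapM : (Fb gap (y :: t)).map (· + 1) ++ [(((x :: y :: t).length : Int))] =
        (Fb gap (y :: t) ++ [(((y :: t).length : Int))]).map (· + 1) := by
      rw [List.map_append, hlen]; rfl
    by_cases hc : gap < y - x
    · rw [if_pos hc]
      have hbr : (0 : Int) :: (([1] ++ (Fb gap (y :: t)).map (· + 1)) ++ [(((x :: y :: t).length : Int))]) =
          0 :: 1 :: (Fb gap (y :: t) ++ [(((y :: t).length : Int))]).map (· + 1) := by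
        simp only [List.cons_append, List.nil_append]
        rw [hmapM]
      rw [hbr, chop_cons, slice_zero_one]
      rw [show ((1:Int) :: (Fb gap (y :: t) ++ [(((y :: t).length : Int))]).map (· + 1)) =
          ((0 : Int) :: (Fb gap (y :: t) ++ [(((y :: t).length : Int))])).map (· + 1) by norm_num]
      have hnn : ∀ b ∈ (0 : Int) :: (Fb gap (y :: t) ++ [(((y :: t).length : Int))]), (0:Int) ≤ b := by
        intro b hb
        rcases List.mem_cons.mp hb with h | h
        · omega
        · exact hM b h
      rw [chop_shift _ _ _ hnn]
      rw [← B_unfold, ih y]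
      simp only [grec1]
      rw [if_neg (by omega)]
    · rw [if_neg hc]
      obtain ⟨m1, M', hM'⟩ := List.exists_cons_of_ne_nil
        (show Fb gap (y :: t) ++ [(((y :: t).length : Int))] ≠ [] from by simp)
      have hm1 : (0:Int) ≤ m1 := hM m1 (by rw [hM']; exact List.mem_cons_self ..)
      have h1 := ih y
      rw [B_unfold, hM', chop_cons, List.cons.injEq] at h1
      have hbr : (0 : Int) :: (([] ++ (Fb gap (y :: t)).map (· + 1)) ++ [(((x :: y :: t).length : Int))]) =
          0 :: (m1 + 1) :: (M'.map (· + 1)) := by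
        simp only [List.nil_append]
        rw [hmapM, hM', List.map_cons]
      rw [hbr, chop_cons]
      rw [show ((m1+1) :: M'.map (· + 1)) = ((m1 :: M').map (· + 1)) from rfl]
      have hnn : ∀ b ∈ m1 :: M', (0:Int) ≤ b := by
        intro b hb
        exact hM b (hM' ▸ hb)
      rw [chop_shift _ _ _ hnn, slice_cons_zero _ _ _ hm1]
      rw [h1.1, h1.2]
      simp only [grec1]
      rw [if_pos (by omega)]

lemma A_fold_pairs (gap : Int) (xs : List Int) (init : List (List Int) × List Int) :
    (PySem.List.pyRange 1 (xs.length : Int)).foldl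
      (fun (st : List (List Int) × List Int) i =>
        if PySem.List.pyGetD xs i 0 - PySem.List.pyGetD xs (i-1) 0 ≤ gap then
          (st.1, st.2 ++ [PySem.List.pyGetD xs i 0])
        else
          (st.1 ++ [st.2], [PySem.List.pyGetD xs i 0])) init
    = (xs.zip xs.tail).foldl (gstep gap) init := by
  rw [pyRange_one_eq]
  have h0 : ((xs.length : Int) - 1).toNat = xs.length - 1 := by omega
  rw [h0, List.foldl_map]
  have hz : xs.zip xs.tail = (List.range (xs.length - 1)).map
      (fun (k : Nat) => (PySem.List.pyGetD xs (k : Int) 0, PySem.List.pyGetD xs ((k : Int) + 1) 0)) := by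
    rw [range_pairs xs (fun a b => (a, b))]
    simp
  rw [hz, List.foldl_map]
  congr 1
  funext st k
  have e1 : (1 : Int) + ↑k - 1 = (k : Int) := by ring
  have e2 : (1 : Int) + ↑k = (k : Int) + 1 := by ring
  rw [e1, e2, gstep]

lemma A_eq (gap : Int) (ys : List Int) (x : Int) :
    group_neighbors (x :: ys) gap = (grec1 gap x ys).1 :: (grec1 gap x ys).2 := by
  simp only [group_neighbors]
  rw [A_fold_pairs]
  have := A_main gap ys x [] []
  simpa using this

-- ===== VERDICT (by name: the statement is the Claim_ definition above) =====
theorem group_neighbors_spec : Claim_equal_group_neighbors := by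
  intro points gap _ hpre
  unfold Spec_group_neighbors
  match points with
  | [] => exact absurd rfl hpre
  | x :: ys => rw [A_eq, B_main]
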